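-- pv_equiv track=rewrite | github.com/miliar/Code_Jam_Webscraper | solutions_python/Problem_116/1511.py | check
-- ===== SOURCE A (Python) =====
-- def check(c, arr):
-- 	untilWin = 4
-- 	for i in arr:
-- 		if c == i or i == 'T':
-- 			untilWin -= 1
-- 			if untilWin == 0:
-- 				break
-- 		else:
-- 			untilWin = 4
-- 	return untilWin == 0
-- ===== SOURCE B (Python) =====
-- def check(c, arr):
--     mask = ''.join('1' if c == i or i == 'T' else '0' for i in arr)
--     return '1111' in mask
-- ===== Notes on version B (the rewrite author's own statement) =====
-- stated objective: simpler
-- what changed: Replaces the explicit countdown state machine (reset-to-4, decrement, break) by building a 0/1 mask of the match predicate and delegating run detection to a substring search for '1111'.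
import Mathlib
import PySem

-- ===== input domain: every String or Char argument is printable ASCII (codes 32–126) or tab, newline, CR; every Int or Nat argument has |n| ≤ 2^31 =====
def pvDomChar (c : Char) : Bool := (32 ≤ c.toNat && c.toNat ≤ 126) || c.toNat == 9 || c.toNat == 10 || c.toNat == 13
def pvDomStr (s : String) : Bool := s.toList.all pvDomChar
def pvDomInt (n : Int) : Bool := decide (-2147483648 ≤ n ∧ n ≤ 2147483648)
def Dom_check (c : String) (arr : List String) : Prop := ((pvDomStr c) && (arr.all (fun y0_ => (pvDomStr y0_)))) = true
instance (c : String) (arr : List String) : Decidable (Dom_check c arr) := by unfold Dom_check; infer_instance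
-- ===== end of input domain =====

-- B replaces A's countdown state machine by a 0/1 mask of the match predicate plus a
-- substring search for "1111" (objective: simpler). Same O(n) cost.

-- ===== PORT A =====
-- A's for-loop over arr with mutable untilWin; 'break' is modelled by returning the
-- state (0) immediately, exactly as the Python loop exits.
def checkLoop (c : String) : List String → Int → Int
  | [], n => n
  | i :: rest, n =>
      if c == i || i == "T" then
        let n' := n - 1
        if n' == 0 then n' else checkLoop c rest n'
      else
        checkLoop c rest 4

def check (c : String) (arr : List String) : Bool :=
  checkLoop c arr 4 == 0

-- ===== PORT B =====
def check_alt (c : String) (arr : List String) : Bool :=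
  let mask := PySem.Str.join "" (arr.map (fun i => if c == i || i == "T" then "1" else "0"))
  PySem.Str.isIn "1111" mask

-- ===== PRECONDITION & SPEC =====
def Spec_check (c : String) (arr : List String) (out : Bool) : Prop := out = check_alt c arr
instance (c : String) (arr : List String) (out : Bool) : Decidable (Spec_check c arr out) := by unfold Spec_check; infer_instance

-- ===== CLAIM (what is proved, stated in full; the proofs are below) =====
def Claim_equal_check : Prop := ∀ (c : String) (arr : List String), Dom_check c arr → Spec_check c arr (check c arr)

-- ===== LEMMAS AND PROOFS =====

def maskOf (c : String) (arr : List String) : List Char :=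
  arr.map (fun i => if c == i || i == "T" then '1' else '0')

theorem replicate_one_prefix_replicate {k n : Nat} (h : k ≤ n) :
    List.replicate k '1' <+: List.replicate n '1' :=
  ⟨List.replicate (n - k) '1', by rw [← List.replicate_add]; congr 1; omega⟩

-- main invariant: the countdown reaches 0 iff the mask starts with n ones or contains 4 consecutive ones
theorem checkLoop_eq_zero_iff (c : String) (arr : List String) (n : Int)
    (h1 : 1 ≤ n) (h4 : n ≤ 4) :
    (checkLoop c arr n = 0) ↔
      (List.replicate n.toNat '1' <+: maskOf c arr ∨
       List.replicate 4 '1' <:+: maskOf c arr) := by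
  induction arr generalizing n with
  | nil =>
    simp only [checkLoop, maskOf, List.map_nil]
    constructor
    · intro h; omega
    · rintro (h | h)
      · exfalso
        have : (List.replicate n.toNat '1').length ≤ ([] : List Char).length := h.length_le
        simp at this; omega
      · exfalso
        have : (List.replicate 4 '1').length ≤ ([] : List Char).length := h.length_le
        simp at this
  | cons i rest ih =>
    have hmask : maskOf c (i :: rest) =
        (if c == i || i == "T" then '1' else '0') :: maskOf c rest := by
      simp [maskOf]
    by_cases hp : (c == i || i == "T") = true
    · -- match case: head is '1'
      rw [hmask, if_pos hp]
      simp only [checkLoop, hp, if_pos]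
      by_cases hn1 : n = 1
      · subst hn1
        norm_num
      · have hne : (n - 1 == 0) = false := by simp; omega
        rw [hne]
        simp only [Bool.false_eq_true, if_false]
        rw [ih (n - 1) (by omega) (by omega)]
        have htn : n.toNat = (n - 1).toNat + 1 := by omega
        constructor
        · rintro (h | h)
          · left
            rw [htn, List.replicate_succ]
            exact List.cons_prefix_cons.mpr ⟨rfl, h⟩
          · right
            exact List.infix_cons_iff.mpr (Or.inr h)
        · rintro (h | h)
          · left
            rw [htn, List.replicate_succ] at h
            exact (List.cons_prefix_cons.mp h).2
          · rcases (List.infix_cons_iff).mp h with h | h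
            · left
              rw [show (4 : Nat) = 3 + 1 from rfl, List.replicate_succ] at h
              exact (replicate_one_prefix_replicate (by omega)).trans
                (List.cons_prefix_cons.mp h).2
            · right; exact h
    · -- non-match case: head is '0', counter resets to 4
      rw [hmask, if_neg hp]
      simp only [checkLoop, hp]
      simp only [Bool.false_eq_true, if_false]
      rw [ih 4 (by norm_num) (by norm_num)]
      constructor
      · rintro (h | h)
        · right; exact List.infix_cons_iff.mpr (Or.inr h.isInfix)
        · right; exact List.infix_cons_iff.mpr (Or.inr h)
      · rintro (h | h)
        · exfalso
          have htn : n.toNat = n.toNat - 1 + 1 := by omega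
          rw [htn, List.replicate_succ] at h
          have := (List.cons_prefix_cons.mp h).1
          simp at this
        · rcases List.infix_cons_iff.mp h with h | h
          · exfalso
            rw [show (4 : Nat) = 3 + 1 from rfl, List.replicate_succ] at h
            have := (List.cons_prefix_cons.mp h).1
            simp at this
          · right; exact h

theorem mask_toList (c : String) (arr : List String) :
    (PySem.Str.join "" (arr.map (fun i => if c == i || i == "T" then "1" else "0"))).toList
      = maskOf c arr := by
  rw [PySem.Str.toList_join]
  have hmaps : (arr.map (fun i => if c == i || i == "T" then "1" else "0")).map String.toList
      = (maskOf c arr).map (fun ch => [ch]) := by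
    simp only [maskOf, List.map_map]
    apply List.map_congr_left
    intro i _
    by_cases hi : (c = i ∨ i = "T")
    · simp [hi]
    · simp [hi]
  rw [hmaps]
  simp [PySem.Chars.join_nil_singletons (maskOf c arr)]

theorem check_eq_alt (c : String) (arr : List String) : check c arr = check_alt c arr := by
  unfold check check_alt
  rw [PySem.Str.isIn_eq, mask_toList]
  have hiff := PySem.Chars.isIn_iff_infix "1111".toList (maskOf c arr)
  rw [show "1111".toList = List.replicate 4 '1' from rfl] at hiff ⊢
  have hloop := checkLoop_eq_zero_iff c arr 4 (by norm_num) (by norm_num)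
  by_cases h : checkLoop c arr 4 = 0
  · have hinf : List.replicate 4 '1' <:+: maskOf c arr := by
      rcases hloop.mp h with h' | h'
      · exact h'.isInfix
      · exact h'
    rw [hiff.mpr hinf]
    simp [h]
  · have hnot : ¬ List.replicate 4 '1' <:+: maskOf c arr := fun hinf =>
      h (hloop.mpr (Or.inr hinf))
    have hfalse : PySem.Chars.isIn (List.replicate 4 '1') (maskOf c arr) = false := by
      rw [Bool.eq_false_iff]
      intro hc
      exact hnot (hiff.mp hc)
    rw [hfalse]
    simp [h]

-- ===== VERDICT (by name: the statement is the Claim_ definition above) =====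
theorem check_spec : Claim_equal_check := by
  intro c arr _
  unfold Spec_check
  exact check_eq_alt c arr
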